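-- pv_equiv track=rewrite | github.com/realmofshine/data_privacy | agent/knowledge_graph_builder.py | build_incident_response_graph
-- ===== SOURCE A (Python) =====
-- def _truncate(text: str, max_len: int = 50) -> str:
--     return (text[:max_len] + "…") if len(text) > max_len else text
--
-- def build_incident_response_graph(query: str) -> dict:
--     nodes, edges = [], []
--     nodes.append({"id": "incident", "label": _truncate(query, 45), "type": "incident", "details": query})
--
--     phases = [
--         ("1. Identification", "Detect and confirm the incident", "agent"),
--         ("2. Containment", "Isolate affected systems", "red_alert"),
--         ("3. Eradication", "Remove threat actors and malware", "yellow_alert"),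
--         ("4. Recovery", "Restore systems and verify", "suggestion"),
--         ("5. Lessons Learned", "Post-incident review", "source"),
--     ]
--     prev = "incident"
--     for i, (name, desc, t) in enumerate(phases):
--         pid = f"phase{i}"
--         nodes.append({"id": pid, "label": f"🚨 {name}", "type": t, "details": desc})
--         edges.append({"source": prev, "target": pid, "label": "then"})
--         prev = pid
--
--     nodes.append({"id": "notify", "label": "📧 Notify Stakeholders", "type": "suggestion", "details": "Legal, CISO, affected users, regulators"})
--     edges.append({"source": "phase1", "target": "notify", "label": "requires"})
--
--     return {"nodes": nodes, "edges": edges}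
-- ===== SOURCE B (Python) =====
-- def _truncate(text: str, max_len: int = 50) -> str:
--     return (text[:max_len] + "…") if len(text) > max_len else text
--
-- # The graph is constant except for the incident node: B stores the fully
-- # unrolled final graph as a literal template and fills in the query.
-- _STATIC_NODES = [
--     {"id": "phase0", "label": "🚨 1. Identification", "type": "agent", "details": "Detect and confirm the incident"},
--     {"id": "phase1", "label": "🚨 2. Containment", "type": "red_alert", "details": "Isolate affected systems"},
--     {"id": "phase2", "label": "🚨 3. Eradication", "type": "yellow_alert", "details": "Remove threat actors and malware"},
--     {"id": "phase3", "label": "🚨 4. Recovery", "type": "suggestion", "details": "Restore systems and verify"},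
--     {"id": "phase4", "label": "🚨 5. Lessons Learned", "type": "source", "details": "Post-incident review"},
--     {"id": "notify", "label": "📧 Notify Stakeholders", "type": "suggestion", "details": "Legal, CISO, affected users, regulators"},
-- ]
--
-- _EDGES = [
--     {"source": "incident", "target": "phase0", "label": "then"},
--     {"source": "phase0", "target": "phase1", "label": "then"},
--     {"source": "phase1", "target": "phase2", "label": "then"},
--     {"source": "phase2", "target": "phase3", "label": "then"},
--     {"source": "phase3", "target": "phase4", "label": "then"},
--     {"source": "phase1", "target": "notify", "label": "requires"},
-- ]
--
-- def build_incident_response_graph(query: str) -> dict: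
--     incident = {"id": "incident", "label": _truncate(query, 45), "type": "incident", "details": query}
--     return {"nodes": [incident] + [dict(n) for n in _STATIC_NODES],
--             "edges": [dict(e) for e in _EDGES]}
-- ===== Notes on version B (the rewrite author's own statement) =====
-- stated objective: simpler
-- what changed: B replaces A's loop over a phase table (generating ids with f-strings and threading a prev variable to chain edges) with the fully constant-folded final graph: all phase/notify nodes and all edges are written out as literals, and only the incident node is computed from the query.
import Mathlib
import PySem

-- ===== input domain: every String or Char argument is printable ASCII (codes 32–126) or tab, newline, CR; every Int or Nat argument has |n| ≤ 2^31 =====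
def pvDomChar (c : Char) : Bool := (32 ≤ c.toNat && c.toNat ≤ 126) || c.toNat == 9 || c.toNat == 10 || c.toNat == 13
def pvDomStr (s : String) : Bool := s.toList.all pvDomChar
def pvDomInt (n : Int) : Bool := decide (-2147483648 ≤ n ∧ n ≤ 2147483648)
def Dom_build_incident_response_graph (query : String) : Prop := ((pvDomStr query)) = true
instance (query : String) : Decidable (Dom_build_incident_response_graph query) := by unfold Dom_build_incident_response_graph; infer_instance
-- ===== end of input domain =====

-- B replaces A's loop over the phase table with the fully constant-folded graph:
-- all static nodes and edges are literals; only the incident node depends on the query (simpler).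


-- ===== PORT A =====
-- _truncate: (text[:max_len] + "…") if len(text) > max_len else text  (exact via PySem slice/len)
def pvTruncate (text : String) (maxLen : Int) : String :=
  if maxLen < PySem.Str.len text
  then String.ofList (PySem.List.slice text.toList none (some maxLen) ++ "…".toList)
  else text

-- f"phase{i}"
def pvPhaseId (i : Int) : String := String.ofList ("phase".toList ++ PySem.Int.toChars i)

def pvPhasesA : List (String × String × String) :=
  [("1. Identification", "Detect and confirm the incident", "agent"),
   ("2. Containment", "Isolate affected systems", "red_alert"),
   ("3. Eradication", "Remove threat actors and malware", "yellow_alert"),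
   ("4. Recovery", "Restore systems and verify", "suggestion"),
   ("5. Lessons Learned", "Post-incident review", "source")]

def build_incident_response_graph (query : String) : List (String × List (List (String × String))) :=
  let nodes : List (List (String × String)) :=
    [[("id", "incident"), ("label", pvTruncate query 45), ("type", "incident"), ("details", query)]]
  let edges : List (List (String × String)) := []
  -- for i, (name, desc, t) in enumerate(phases): append node, append edge, prev = pid
  let st := (PySem.List.enumerate pvPhasesA).foldl
    (fun (st : List (List (String × String)) × List (List (String × String)) × String) p =>
      let (nodes, edges, prev) := st
      let (i, name, desc, t) := p
      let pid := pvPhaseId i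
      (nodes ++ [[("id", pid), ("label", String.ofList ("🚨 ".toList ++ name.toList)), ("type", t), ("details", desc)]],
       edges ++ [[("source", prev), ("target", pid), ("label", "then")]],
       pid))
    (nodes, edges, "incident")
  let nodes := st.1 ++ [[("id", "notify"), ("label", "📧 Notify Stakeholders"), ("type", "suggestion"),
                         ("details", "Legal, CISO, affected users, regulators")]]
  let edges := st.2.1 ++ [[("source", "phase1"), ("target", "notify"), ("label", "requires")]]
  [("nodes", nodes), ("edges", edges)]

-- ===== PORT B =====
-- B's constant template: the static nodes and all edges, fully unrolled literals.
def pvStaticNodes : List (List (String × String)) :=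
  [[("id", "phase0"), ("label", "🚨 1. Identification"), ("type", "agent"), ("details", "Detect and confirm the incident")],
   [("id", "phase1"), ("label", "🚨 2. Containment"), ("type", "red_alert"), ("details", "Isolate affected systems")],
   [("id", "phase2"), ("label", "🚨 3. Eradication"), ("type", "yellow_alert"), ("details", "Remove threat actors and malware")],
   [("id", "phase3"), ("label", "🚨 4. Recovery"), ("type", "suggestion"), ("details", "Restore systems and verify")],
   [("id", "phase4"), ("label", "🚨 5. Lessons Learned"), ("type", "source"), ("details", "Post-incident review")],
   [("id", "notify"), ("label", "📧 Notify Stakeholders"), ("type", "suggestion"), ("details", "Legal, CISO, affected users, regulators")]]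

def pvStaticEdges : List (List (String × String)) :=
  [[("source", "incident"), ("target", "phase0"), ("label", "then")],
   [("source", "phase0"), ("target", "phase1"), ("label", "then")],
   [("source", "phase1"), ("target", "phase2"), ("label", "then")],
   [("source", "phase2"), ("target", "phase3"), ("label", "then")],
   [("source", "phase3"), ("target", "phase4"), ("label", "then")],
   [("source", "phase1"), ("target", "notify"), ("label", "requires")]]

def build_incident_response_graph_alt (query : String) : List (String × List (List (String × String))) :=
  let incident : List (String × String) :=
    [("id", "incident"), ("label", pvTruncate query 45), ("type", "incident"), ("details", query)]
  [("nodes", incident :: pvStaticNodes), ("edges", pvStaticEdges)]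

-- ===== PRECONDITION & SPEC =====
def Spec_build_incident_response_graph (query : String) (out : List (String × List (List (String × String)))) : Prop := out = build_incident_response_graph_alt query
instance (query : String) (out : List (String × List (List (String × String)))) : Decidable (Spec_build_incident_response_graph query out) := by unfold Spec_build_incident_response_graph; infer_instance

-- ===== CLAIM (what is proved, stated in full; the proofs are below) =====
def Claim_equal_build_incident_response_graph : Prop := ∀ (query : String), Dom_build_incident_response_graph query → Spec_build_incident_response_graph query (build_incident_response_graph query)

-- ===== LEMMAS AND PROOFS =====

-- ===== VERDICT (by name: the statement is the Claim_ definition above) =====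
theorem build_incident_response_graph_spec : Claim_equal_build_incident_response_graph := by
  intro query _
  unfold Spec_build_incident_response_graph build_incident_response_graph build_incident_response_graph_alt
  rfl
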